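-- pv_equiv track=rewrite | github.com/erictwalker18/nlp | authorship_ngrams/classifier.py | findcounts
-- ===== SOURCE A (Python) =====
-- def findcounts(langmodel, vocabsize):
--     '''Counts is the counts for counts of words for each n-gram
--     that is... counts=[{0:123,1:131,2:3},{0:12,1:323,2:4}...]
--                         ^unigram counts   ^bigram counts ...'''
--     counts = []
--     temp = []
--     for m in langmodel:
--         for val in m.values():
--             temp.append(val)
--         counts.append({})
--         for i in range(6):
--             counts[-1][i+1] = temp.count(i+1)
--
--         #number of possible ngrams-number of ngrams seen
--         counts[-1][0] = vocabsize**len(counts)-len(m)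
--     return counts
-- ===== SOURCE B (Python) =====
-- def findcounts(langmodel, vocabsize):
--     # Two passes: per-model histograms of values 1..6, then running prefix sums.
--     tables = []
--     for m in langmodel:
--         t = [0] * 6
--         for v in m.values():
--             if 1 <= v <= 6:
--                 t[v - 1] += 1
--         tables.append(t)
--     result = []
--     run = [0] * 6
--     for k, (m, t) in enumerate(zip(langmodel, tables)):
--         run = [a + b for a, b in zip(run, t)]
--         d = {j + 1: run[j] for j in range(6)}
--         d[0] = vocabsize ** (k + 1) - len(m)
--         result.append(d)
--     return result
-- ===== Notes on version B (the rewrite author's own statement) =====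
-- stated objective: faster
-- what changed: A keeps one ever-growing list of all values seen so far and rescans it with .count(i+1) six times per model; B makes two passes: per-model length-6 histograms of values 1..6, then a running prefix-sum vector, so no cumulative list is ever rescanned.
import Mathlib
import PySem

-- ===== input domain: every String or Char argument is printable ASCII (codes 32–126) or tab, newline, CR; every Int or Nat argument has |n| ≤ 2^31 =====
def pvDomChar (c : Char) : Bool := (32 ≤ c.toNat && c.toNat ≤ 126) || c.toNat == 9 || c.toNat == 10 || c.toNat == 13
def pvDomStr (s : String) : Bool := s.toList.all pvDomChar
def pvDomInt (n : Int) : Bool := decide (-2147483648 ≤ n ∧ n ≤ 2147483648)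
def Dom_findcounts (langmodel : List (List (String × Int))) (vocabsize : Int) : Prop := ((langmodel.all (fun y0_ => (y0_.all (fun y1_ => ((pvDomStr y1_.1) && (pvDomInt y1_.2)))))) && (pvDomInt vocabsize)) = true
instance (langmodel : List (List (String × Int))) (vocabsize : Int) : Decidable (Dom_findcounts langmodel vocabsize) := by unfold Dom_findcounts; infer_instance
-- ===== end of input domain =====

-- B replaces A's ever-growing value list re-scanned with .count by per-model histograms
-- followed by running prefix sums (alternative decomposition; same cumulative result).


-- ===== PORT A =====
-- loop body of A: temp += m.values(); counts.append({}); for i in range(6):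
-- counts[-1][i+1] = temp.count(i+1); counts[-1][0] = vocabsize**len(counts) - len(m)
def findcountsStepA (vocabsize : Int)
    (st : List (PySem.Dict Int Int) × List Int) (m : List (String × Int)) :
    List (PySem.Dict Int Int) × List Int :=
  let temp := st.2 ++ (PySem.Dict.ofList m).values
  let d := (PySem.List.pyRange 0 6 1).foldl
      (fun d i => d.insert (i + 1) ((temp.count (i + 1) : Int))) PySem.Dict.empty
  let d := d.insert 0 (vocabsize ^ (st.1.length + 1) - ((PySem.Dict.ofList m).size : Int))
  (st.1 ++ [d], temp)

def findcounts (langmodel : List (List (String × Int))) (vocabsize : Int) : List (List (Int × Int)) :=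
  ((langmodel.foldl (findcountsStepA vocabsize) ([], [])).1).map PySem.Dict.items

-- ===== PORT B =====
-- histogram update of B's first pass: t[v-1] += 1 when 1 <= v <= 6
def pvBump (t : List Int) (v : Int) : List Int :=
  if 1 ≤ v ∧ v ≤ 6 then t.set (v - 1).toNat (t.getD (v - 1).toNat 0 + 1) else t

-- B's second-pass loop body over (m, t) pairs; state = (result, run, k)
def findcountsStepB (vocabsize : Int)
    (st : List (List (Int × Int)) × List Int × Nat)
    (p : List (String × Int) × List Int) :
    List (List (Int × Int)) × List Int × Nat :=
  let run := List.zipWith (· + ·) st.2.1 p.2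
  let d := (List.range 6).map (fun (j : Nat) => (((j : Int) + 1), run.getD j 0))
  let d := d ++ [(0, vocabsize ^ (st.2.2 + 1) - ((PySem.Dict.ofList p.1).size : Int))]
  (st.1 ++ [d], run, st.2.2 + 1)

def findcounts_alt (langmodel : List (List (String × Int))) (vocabsize : Int) : List (List (Int × Int)) :=
  let tables := langmodel.map (fun m => ((PySem.Dict.ofList m).values).foldl pvBump [0, 0, 0, 0, 0, 0])
  ((langmodel.zip tables).foldl (findcountsStepB vocabsize) ([], [0, 0, 0, 0, 0, 0], 0)).1

-- ===== PRECONDITION & SPEC =====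
def Spec_findcounts (langmodel : List (List (String × Int))) (vocabsize : Int) (out : List (List (Int × Int))) : Prop := out = findcounts_alt langmodel vocabsize
instance (langmodel : List (List (String × Int))) (vocabsize : Int) (out : List (List (Int × Int))) : Decidable (Spec_findcounts langmodel vocabsize out) := by unfold Spec_findcounts; infer_instance

-- ===== CLAIM (what is proved, stated in full; the proofs are below) =====
def Claim_equal_findcounts : Prop := ∀ (langmodel : List (List (String × Int))) (vocabsize : Int), Dom_findcounts langmodel vocabsize → Spec_findcounts langmodel vocabsize (findcounts langmodel vocabsize)

-- ===== LEMMAS AND PROOFS =====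

-- proof-only abbreviations: the dict A builds per model, and the row B builds per model
def pvDictOf (c1 c2 c3 c4 c5 c6 x : Int) : PySem.Dict Int Int :=
  (((((((PySem.Dict.empty : PySem.Dict Int Int).insert 1 c1).insert 2 c2).insert 3 c3).insert
      4 c4).insert 5 c5).insert 6 c6).insert 0 x

def pvRow (c1 c2 c3 c4 c5 c6 x : Int) : List (Int × Int) :=
  [(1, c1), (2, c2), (3, c3), (4, c4), (5, c5), (6, c6), (0, x)]

theorem pvDictOf_items (c1 c2 c3 c4 c5 c6 x : Int) :
    (pvDictOf c1 c2 c3 c4 c5 c6 x).items = pvRow c1 c2 c3 c4 c5 c6 x := by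
  simp [pvDictOf, pvRow, PySem.Dict.insert, PySem.Dict.empty]

-- B's first pass: folding pvBump tallies occurrences of 1..6
theorem pvBump_foldl (vs : List Int) : ∀ a1 a2 a3 a4 a5 a6 : Int,
    vs.foldl pvBump [a1, a2, a3, a4, a5, a6] =
      [a1 + vs.count 1, a2 + vs.count 2, a3 + vs.count 3,
       a4 + vs.count 4, a5 + vs.count 5, a6 + vs.count 6] := by
  induction vs with
  | nil => intro a1 a2 a3 a4 a5 a6; simp
  | cons v vs ih =>
    intro a1 a2 a3 a4 a5 a6
    rw [List.foldl_cons]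
    by_cases h1 : v = 1
    · subst h1
      rw [show pvBump [a1,a2,a3,a4,a5,a6] 1 = [a1+1,a2,a3,a4,a5,a6] from rfl, ih]
      simp; omega
    · by_cases h2 : v = 2
      · subst h2
        rw [show pvBump [a1,a2,a3,a4,a5,a6] 2 = [a1,a2+1,a3,a4,a5,a6] from rfl, ih]
        simp; omega
      · by_cases h3 : v = 3
        · subst h3
          rw [show pvBump [a1,a2,a3,a4,a5,a6] 3 = [a1,a2,a3+1,a4,a5,a6] from rfl, ih]
          simp; omega
        · by_cases h4 : v = 4
          · subst h4
            rw [show pvBump [a1,a2,a3,a4,a5,a6] 4 = [a1,a2,a3,a4+1,a5,a6] from rfl, ih]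
            simp; omega
          · by_cases h5 : v = 5
            · subst h5
              rw [show pvBump [a1,a2,a3,a4,a5,a6] 5 = [a1,a2,a3,a4,a5+1,a6] from rfl, ih]
              simp; omega
            · by_cases h6 : v = 6
              · subst h6
                rw [show pvBump [a1,a2,a3,a4,a5,a6] 6 = [a1,a2,a3,a4,a5,a6+1] from rfl, ih]
                simp; omega
              · have hc : ¬(1 ≤ v ∧ v ≤ 6) := by omega
                simp only [pvBump, if_neg hc]
                rw [ih]; simp [h1, h2, h3, h4, h5, h6]

-- main loop invariant: A's (counts, temp) vs B's (result, run, k)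
theorem pv_loop (vocabsize : Int) (ms : List (List (String × Int))) :
    ∀ (temp : List Int) (accA : List (PySem.Dict Int Int)) (accB : List (List (Int × Int))),
    accB = accA.map PySem.Dict.items →
    ((ms.foldl (findcountsStepA vocabsize) (accA, temp)).1).map PySem.Dict.items =
      ((ms.zip (ms.map (fun m => ((PySem.Dict.ofList m).values).foldl pvBump [0, 0, 0, 0, 0, 0]))).foldl
        (findcountsStepB vocabsize)
        (accB, [(temp.count 1 : Int), temp.count 2, temp.count 3, temp.count 4, temp.count 5, temp.count 6],
         accA.length)).1 := by
  induction ms with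
  | nil => intro temp accA accB h; simpa using h.symm
  | cons m ms ih =>
    intro temp accA accB h
    rw [List.map_cons, List.zip_cons_cons, List.foldl_cons, List.foldl_cons]
    have hstepA : findcountsStepA vocabsize (accA, temp) m =
        (accA ++ [pvDictOf
            ((temp ++ (PySem.Dict.ofList m).values).count 1 : Int)
            ((temp ++ (PySem.Dict.ofList m).values).count 2 : Int)
            ((temp ++ (PySem.Dict.ofList m).values).count 3 : Int)
            ((temp ++ (PySem.Dict.ofList m).values).count 4 : Int)
            ((temp ++ (PySem.Dict.ofList m).values).count 5 : Int)
            ((temp ++ (PySem.Dict.ofList m).values).count 6 : Int)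
            (vocabsize ^ (accA.length + 1) - ((PySem.Dict.ofList m).size : Int))],
          temp ++ (PySem.Dict.ofList m).values) := by
      simp only [findcountsStepA, pvDictOf, show PySem.List.pyRange 0 6 1 = [0,1,2,3,4,5] from rfl,
        List.foldl_cons, List.foldl_nil]
      norm_num
    have hstepB : findcountsStepB vocabsize
        (accB, [(temp.count 1 : Int), temp.count 2, temp.count 3, temp.count 4, temp.count 5, temp.count 6], accA.length)
        (m, ((PySem.Dict.ofList m).values).foldl pvBump [0, 0, 0, 0, 0, 0]) =
        (accB ++ [pvRow
            ((temp ++ (PySem.Dict.ofList m).values).count 1 : Int)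
            ((temp ++ (PySem.Dict.ofList m).values).count 2 : Int)
            ((temp ++ (PySem.Dict.ofList m).values).count 3 : Int)
            ((temp ++ (PySem.Dict.ofList m).values).count 4 : Int)
            ((temp ++ (PySem.Dict.ofList m).values).count 5 : Int)
            ((temp ++ (PySem.Dict.ofList m).values).count 6 : Int)
            (vocabsize ^ (accA.length + 1) - ((PySem.Dict.ofList m).size : Int))],
         [((temp ++ (PySem.Dict.ofList m).values).count 1 : Int),
          (temp ++ (PySem.Dict.ofList m).values).count 2,
          (temp ++ (PySem.Dict.ofList m).values).count 3,
          (temp ++ (PySem.Dict.ofList m).values).count 4,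
          (temp ++ (PySem.Dict.ofList m).values).count 5,
          (temp ++ (PySem.Dict.ofList m).values).count 6], accA.length + 1) := by
      simp only [findcountsStepB, pvRow, pvBump_foldl, List.count_append]
      norm_num [List.range_succ]
    rw [hstepA, hstepB]
    have hacc : accB ++ [pvRow
        ((temp ++ (PySem.Dict.ofList m).values).count 1 : Int)
        ((temp ++ (PySem.Dict.ofList m).values).count 2 : Int)
        ((temp ++ (PySem.Dict.ofList m).values).count 3 : Int)
        ((temp ++ (PySem.Dict.ofList m).values).count 4 : Int)
        ((temp ++ (PySem.Dict.ofList m).values).count 5 : Int)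
        ((temp ++ (PySem.Dict.ofList m).values).count 6 : Int)
        (vocabsize ^ (accA.length + 1) - ((PySem.Dict.ofList m).size : Int))] =
        (accA ++ [pvDictOf
        ((temp ++ (PySem.Dict.ofList m).values).count 1 : Int)
        ((temp ++ (PySem.Dict.ofList m).values).count 2 : Int)
        ((temp ++ (PySem.Dict.ofList m).values).count 3 : Int)
        ((temp ++ (PySem.Dict.ofList m).values).count 4 : Int)
        ((temp ++ (PySem.Dict.ofList m).values).count 5 : Int)
        ((temp ++ (PySem.Dict.ofList m).values).count 6 : Int)
        (vocabsize ^ (accA.length + 1) - ((PySem.Dict.ofList m).size : Int))]).map PySem.Dict.items := by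
      rw [List.map_append, List.map_cons, List.map_nil, pvDictOf_items, h]
    have := ih (temp ++ (PySem.Dict.ofList m).values) (accA ++ [_]) (accB ++ [_]) hacc
    simpa using this

-- ===== VERDICT (by name: the statement is the Claim_ definition above) =====
theorem findcounts_spec : Claim_equal_findcounts := by
  intro langmodel vocabsize _
  unfold Spec_findcounts findcounts findcounts_alt
  simpa using pv_loop vocabsize langmodel [] [] [] rfl
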